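-- pv_equiv track=rewrite | github.com/johnywalves/pgcc-pdi | generate_images.py | quantization_c
-- ===== SOURCE A (Python) =====
-- def quantization_c(x, y):
--     # Coordenates to Boxs
--     # (X initial, Y inital, X final, Y final)
--     positions_boxs = [
--         [45, 55, 85, 75],
--         [173, 55, 213, 75],
--         [45, 55 + 128, 85, 75 + 128],
--         [173, 55 + 128, 213, 75 + 128]
--     ]
--
--     def inner_box(a, b):
--         for p in positions_boxs:
--             if (a > p[0]) and (a <= p[2]) and (b > p[1]) and (b <= p[3]):
--                 return True
--         return False
--
--     if y < 128:
--         if inner_box(x, y):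
--             return 150
--
--         return 200
--
--     if inner_box(x, y):
--         return 200
--
--     return 150
-- ===== SOURCE B (Python) =====
-- def quantization_c(x, y):
--     # The 4 boxes are one base box (45,85]x(55,75] tiled with period 128 on both axes.
--     # A coordinate is in a box iff it lies in the overall tiled band and its
--     # residue mod 128 falls in the base box's interval.
--     inner = (45 < x <= 213 and 45 < x % 128 <= 85 and
--              55 < y <= 203 and 55 < y % 128 <= 75)
--     # top half (y < 128) colours boxes dark; bottom half inverts the palette
--     return 150 if inner == (y < 128) else 200
-- ===== Notes on version B (the rewrite author's own statement) =====
-- stated objective: alternative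
-- what changed: Instead of scanning a list of 4 rectangles, B treats them as one base box tiled with period 128 on both axes: membership is a band check plus a mod-128 residue check, and the y<128 polarity swap is folded into a single equality test (inner == (y<128)) selecting 150 or 200.
import Mathlib
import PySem

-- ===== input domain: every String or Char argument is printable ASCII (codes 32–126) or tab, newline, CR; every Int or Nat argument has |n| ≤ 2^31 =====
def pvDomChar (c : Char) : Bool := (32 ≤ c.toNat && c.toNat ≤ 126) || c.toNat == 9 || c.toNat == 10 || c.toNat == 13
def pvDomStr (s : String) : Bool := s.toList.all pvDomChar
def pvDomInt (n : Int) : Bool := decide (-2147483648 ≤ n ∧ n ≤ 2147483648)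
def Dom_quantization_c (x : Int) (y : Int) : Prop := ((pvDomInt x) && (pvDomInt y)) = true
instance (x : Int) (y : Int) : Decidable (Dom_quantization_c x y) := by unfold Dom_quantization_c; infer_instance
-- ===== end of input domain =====

-- B replaces A's scan over 4 rectangles by a mod-128 tiling test and folds the y<128
-- polarity swap into one equality (alternative decomposition, same cost).

-- ===== PORT A =====
-- boxes as (x initial, y initial, x final, y final), exactly A's literals
def pvBoxes : List (Int × Int × Int × Int) :=
  [(45, 55, 85, 75), (173, 55, 213, 75), (45, 55 + 128, 85, 75 + 128), (173, 55 + 128, 213, 75 + 128)]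

-- the 'for p in positions_boxs' loop of inner_box, early-returning True
def pvInnerLoop (a : Int) (b : Int) : List (Int × Int × Int × Int) → Bool
  | [] => false
  | p :: rest =>
      if a > p.1 ∧ a ≤ p.2.2.1 ∧ b > p.2.1 ∧ b ≤ p.2.2.2 then true
      else pvInnerLoop a b rest

def quantization_c (x : Int) (y : Int) : Int :=
  if y < 128 then
    if pvInnerLoop x y pvBoxes then 150 else 200
  else
    if pvInnerLoop x y pvBoxes then 200 else 150

-- ===== PORT B =====
def quantization_c_alt (x : Int) (y : Int) : Int :=
  let inner : Bool :=
    decide (45 < x ∧ x ≤ 213) && decide (45 < PySem.Int.mod x 128 ∧ PySem.Int.mod x 128 ≤ 85) &&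
    decide (55 < y ∧ y ≤ 203) && decide (55 < PySem.Int.mod y 128 ∧ PySem.Int.mod y 128 ≤ 75)
  if inner == decide (y < 128) then 150 else 200

-- ===== PRECONDITION & SPEC =====
def Spec_quantization_c (x : Int) (y : Int) (out : Int) : Prop := out = quantization_c_alt x y
instance (x : Int) (y : Int) (out : Int) : Decidable (Spec_quantization_c x y out) := by unfold Spec_quantization_c; infer_instance

-- ===== CLAIM =====
def Claim_equal_quantization_c : Prop := ∀ (x : Int) (y : Int), Dom_quantization_c x y → Spec_quantization_c x y (quantization_c x y)

-- ===== LEMMAS AND PROOFS =====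
theorem pvInnerLoop_iff (x y : Int) :
    pvInnerLoop x y pvBoxes = true ↔
      ((45 < x ∧ x ≤ 213) ∧ (45 < x % 128 ∧ x % 128 ≤ 85) ∧
       (55 < y ∧ y ≤ 203) ∧ (55 < y % 128 ∧ y % 128 ≤ 75)) := by
  simp only [pvBoxes, pvInnerLoop]
  split_ifs <;> simp_all <;> omega

theorem alt_inner_eq (x y : Int) :
    (decide (45 < x ∧ x ≤ 213) && decide (45 < PySem.Int.mod x 128 ∧ PySem.Int.mod x 128 ≤ 85) &&
     decide (55 < y ∧ y ≤ 203) && decide (55 < PySem.Int.mod y 128 ∧ PySem.Int.mod y 128 ≤ 75))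
      = pvInnerLoop x y pvBoxes := by
  simp only [PySem.Int.mod_eq_emod_of_pos (b := 128) (by norm_num)]
  by_cases hin : pvInnerLoop x y pvBoxes = true
  · have h := (pvInnerLoop_iff x y).mp hin
    simp [hin, h.1, h.2.1, h.2.2.1, h.2.2.2]
  · have h := fun hp => hin ((pvInnerLoop_iff x y).mpr hp)
    simp only [Bool.not_eq_true] at hin
    rw [hin]
    simp only [Bool.and_eq_false_iff, decide_eq_false_iff_not]
    by_contra hc
    push Not at hc
    exact h ⟨hc.1.1.1, hc.1.1.2, hc.1.2, hc.2⟩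

-- ===== VERDICT =====
theorem quantization_c_spec : Claim_equal_quantization_c := by
  intro x y _
  unfold Spec_quantization_c quantization_c quantization_c_alt
  rw [alt_inner_eq]
  by_cases hin : pvInnerLoop x y pvBoxes = true <;>
    simp only [Bool.not_eq_true] at hin <;>
    by_cases hy : y < 128 <;> simp [hin, hy]
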